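-- pv_equiv track=rewrite | github.com/LotusPenguin/MNproject2 | utils.py | build_band_matrix
-- ===== SOURCE A (Python) =====
-- def build_band_matrix(N, a1, diagonal_width=1, a2=None, a3=None):
--     A = [[0 for _ in range(N)] for _ in range(N)]
--     for i in range(N):
--         for j in range(N):
--             if i == j:
--                 A[i][j] = a1
--
--     if diagonal_width > 1:
--         for i in range(N):
--             for j in range(N):
--                 if i == j + 1 or i == j - 1:
--                     A[i][j] = a2
--                 elif diagonal_width > 2 and (i == j + 2 or i == j - 2):
--                     A[i][j] = a3
--     return A
-- ===== SOURCE B (Python) =====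
-- def build_band_matrix(N, a1, diagonal_width=1, a2=None, a3=None):
--     A = [[0] * N for _ in range(N)]
--     for i in range(N):
--         A[i][i] = a1
--     if diagonal_width > 1:
--         for i in range(N - 1):
--             A[i][i + 1] = a2
--             A[i + 1][i] = a2
--         if diagonal_width > 2:
--             for i in range(N - 2):
--                 A[i][i + 2] = a3
--                 A[i + 2][i] = a3
--     return A
-- ===== Notes on version B (the rewrite author's own statement) =====
-- stated objective: faster
-- what changed: B zero-fills the matrix and writes each diagonal by direct indexing with three O(N) loops (A[i][i], A[i][i+1]/A[i+1][i], A[i][i+2]/A[i+2][i]), instead of A's three full O(N^2) scans testing a band condition at every cell.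
-- outside the precondition, e.g. on build_band_matrix(2, 5, 2, None, None): A returns [[5, None], [None, 5]], B returns [[5, None], [None, 5]]
import Mathlib
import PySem

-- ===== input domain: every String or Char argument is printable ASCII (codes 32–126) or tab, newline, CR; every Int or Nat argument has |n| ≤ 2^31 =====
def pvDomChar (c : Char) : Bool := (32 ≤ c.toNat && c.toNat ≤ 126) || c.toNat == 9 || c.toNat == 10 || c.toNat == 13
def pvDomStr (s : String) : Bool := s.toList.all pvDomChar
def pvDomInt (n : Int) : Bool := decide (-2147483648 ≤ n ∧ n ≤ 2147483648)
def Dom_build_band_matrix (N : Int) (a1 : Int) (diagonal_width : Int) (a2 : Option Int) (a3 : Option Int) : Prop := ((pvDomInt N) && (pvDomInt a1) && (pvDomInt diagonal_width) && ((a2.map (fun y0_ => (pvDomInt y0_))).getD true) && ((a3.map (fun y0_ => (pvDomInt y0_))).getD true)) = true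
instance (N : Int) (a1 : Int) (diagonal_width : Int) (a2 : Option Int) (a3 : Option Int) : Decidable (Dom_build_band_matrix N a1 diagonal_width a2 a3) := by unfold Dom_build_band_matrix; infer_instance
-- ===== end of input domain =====

-- B zero-fills the matrix and writes each diagonal by direct indexing with three O(N)
-- loops instead of A's three full O(N^2) conditional scans (objective: faster).

-- ===== PORT A =====
-- Under Pre_ below, a2/a3 are `some _` whenever they are written, so `.getD 0` never defaults.
def build_band_matrix (N : Int) (a1 : Int) (diagonal_width : Int) (a2 : Option Int) (a3 : Option Int) : List (List Int) :=
  let A0 : List (List Int) :=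
    (PySem.List.pyRange 0 N 1).map (fun _ => (PySem.List.pyRange 0 N 1).map (fun _ => (0 : Int)))
  let A1 : List (List Int) :=
    (PySem.List.pyRange 0 N 1).foldl (fun A i =>
      (PySem.List.pyRange 0 N 1).foldl (fun A j =>
        if i == j then A.modify i.toNat (fun row => row.set j.toNat a1) else A) A) A0
  if diagonal_width > 1 then
    (PySem.List.pyRange 0 N 1).foldl (fun A i =>
      (PySem.List.pyRange 0 N 1).foldl (fun A j =>
        if i == j + 1 || i == j - 1 then
          A.modify i.toNat (fun row => row.set j.toNat (a2.getD 0))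
        else if decide (diagonal_width > 2) && (i == j + 2 || i == j - 2) then
          A.modify i.toNat (fun row => row.set j.toNat (a3.getD 0))
        else A) A) A1
  else A1

-- ===== PORT B =====
-- Transliteration of Source B: zero rows, then three direct-index diagonal-fill loops.
def build_band_matrix_alt (N : Int) (a1 : Int) (diagonal_width : Int) (a2 : Option Int) (a3 : Option Int) : List (List Int) :=
  let A0 : List (List Int) :=
    (PySem.List.pyRange 0 N 1).map (fun _ => List.replicate N.toNat (0 : Int))
  let A1 : List (List Int) :=
    (PySem.List.pyRange 0 N 1).foldl (fun A i =>
      A.modify i.toNat (fun r => r.set i.toNat a1)) A0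
  if diagonal_width > 1 then
    let A2 : List (List Int) :=
      (PySem.List.pyRange 0 (N - 1) 1).foldl (fun A i =>
        (A.modify i.toNat (fun r => r.set (i.toNat + 1) (a2.getD 0))).modify
          (i.toNat + 1) (fun r => r.set i.toNat (a2.getD 0))) A1
    if diagonal_width > 2 then
      (PySem.List.pyRange 0 (N - 2) 1).foldl (fun A i =>
        (A.modify i.toNat (fun r => r.set (i.toNat + 2) (a3.getD 0))).modify
          (i.toNat + 2) (fun r => r.set i.toNat (a3.getD 0))) A2
    else A2
  else A1

-- ===== PRECONDITION & SPEC =====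
-- Pre_ excludes inputs on which the Python functions return a matrix containing None
-- instead of a number (a2=None written when diagonal_width>1 and N≥2, a3=None written when
-- diagonal_width>2 and N≥3): such a matrix is not a value of the declared type List (List Int).
def Pre_build_band_matrix (N : Int) (a1 : Int) (diagonal_width : Int) (a2 : Option Int) (a3 : Option Int) : Prop :=
  (diagonal_width > 1 ∧ 2 ≤ N → a2 ≠ none) ∧ (diagonal_width > 2 ∧ 3 ≤ N → a3 ≠ none)
instance (N : Int) (a1 : Int) (diagonal_width : Int) (a2 : Option Int) (a3 : Option Int) : Decidable (Pre_build_band_matrix N a1 diagonal_width a2 a3) := by unfold Pre_build_band_matrix; infer_instance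
def pvWitness_build_band_matrix : Int × Int × Int × Option Int × Option Int := (4, 5, 3, some 2, some 1)

def Spec_build_band_matrix (N : Int) (a1 : Int) (diagonal_width : Int) (a2 : Option Int) (a3 : Option Int) (out : List (List Int)) : Prop := out = build_band_matrix_alt N a1 diagonal_width a2 a3
instance (N : Int) (a1 : Int) (diagonal_width : Int) (a2 : Option Int) (a3 : Option Int) (out : List (List Int)) : Decidable (Spec_build_band_matrix N a1 diagonal_width a2 a3 out) := by unfold Spec_build_band_matrix; infer_instance

-- ===== CLAIM (what is proved, stated in full; the proofs are below) =====
def Claim_equal_build_band_matrix : Prop := ∀ (N : Int) (a1 : Int) (diagonal_width : Int) (a2 : Option Int) (a3 : Option Int), Dom_build_band_matrix N a1 diagonal_width a2 a3 → Pre_build_band_matrix N a1 diagonal_width a2 a3 → Spec_build_band_matrix N a1 diagonal_width a2 a3 (build_band_matrix N a1 diagonal_width a2 a3)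

-- ===== LEMMAS AND PROOFS =====

theorem pv_modify_append {α : Type} (xs ys : List α) (i : Nat) (f : α → α) (h : i < xs.length) :
    (xs ++ ys).modify i f = xs.modify i f ++ ys := by
  induction xs generalizing i with
  | nil => simp at h
  | cons x xs ih =>
    cases i with
    | zero => simp [List.modify]
    | succ i =>
      simp only [List.cons_append, List.modify_succ_cons]
      rw [ih]
      simpa using h

theorem pv_modify_last {α : Type} (xs : List α) (y : α) (f : α → α) (m : Nat) (h : m = xs.length) :
    (xs ++ [y]).modify m f = xs ++ [f y] := by
  subst h
  induction xs with
  | nil => simp [List.modify]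
  | cons x xs ih => simpa [List.modify_succ_cons] using ih

theorem pv_modify_modify {α : Type} (l : List α) (i : Nat) (f g : α → α) :
    (l.modify i f).modify i g = l.modify i (fun x => g (f x)) := by
  induction l generalizing i with
  | nil => simp
  | cons x xs ih =>
    cases i with
    | zero => simp [List.modify]
    | succ i => simp [List.modify_succ_cons, ih]

-- fold of modifies at the same index composes into one modify
theorem pv_foldl_modify_same {α β : Type} (js : List β) (i : Nat) (h : β → α → α) (l : List α) :
    js.foldl (fun A j => A.modify i (h j)) l
      = l.modify i (fun r => js.foldl (fun r j => h j r) r) := by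
  induction js generalizing l with
  | nil => simp only [List.foldl_nil]; exact (List.modify_id i l).symm
  | cons j js ih => simp only [List.foldl_cons]; rw [ih, pv_modify_modify]

-- a pass of per-index updates over range n, on a map over range n, acts pointwise
theorem pv_fold_upd {α : Type} (u : Nat → α → α) (g : Nat → α) (n : Nat) :
    (List.range n).foldl (fun xs j => xs.modify j (u j)) ((List.range n).map g)
      = (List.range n).map (fun k => u k (g k)) := by
  induction n with
  | zero => simp
  | succ n ih =>
    have hcomm : ∀ (js : List Nat) (xs ys : List α), (∀ j ∈ js, j < xs.length) →
        js.foldl (fun xs j => xs.modify j (u j)) (xs ++ ys)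
          = js.foldl (fun xs j => xs.modify j (u j)) xs ++ ys := by
      intro js
      induction js with
      | nil => intro xs ys _; rfl
      | cons j js ihj =>
        intro xs ys hlt
        simp only [List.foldl_cons]
        rw [pv_modify_append _ _ _ _ (hlt j (by simp))]
        exact ihj _ _ (fun j' hj' => by
          rw [List.length_modify]; exact hlt j' (List.mem_cons_of_mem _ hj'))
    rw [List.range_succ, List.map_append, List.foldl_append,
        hcomm _ _ _ (fun j hj => by simpa using List.mem_range.mp hj), ih]
    simp only [List.foldl_cons, List.foldl_nil, List.map_cons, List.map_nil]
    rw [pv_modify_last _ _ _ n (by simp)]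
    simp

-- a conditional single-cell write as a pointwise modify (`o = none` means no write)
theorem pv_opt_write (A : List (List Int)) (i j : Nat) (o : Option Int) :
    (match o with
      | some v => A.modify i (fun r => r.set j v)
      | none => A)
      = A.modify i (fun r => r.modify j (fun x => o.getD x)) := by
  cases o with
  | some v => simp [List.set_eq_modify]
  | none =>
    have h1 : ∀ r : List Int, r.modify j (fun x => x) = r := fun r => List.modify_id j r
    simp only [Option.getD_none, h1]
    exact (List.modify_id i A).symm

-- one full double scan over an n×n matrix of per-cell optional writes acts pointwise
theorem pv_pass (n : Nat) (o : Nat → Nat → Option Int) (g : Nat → Nat → Int) :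
    (List.range n).foldl (fun A i => (List.range n).foldl (fun A j =>
         A.modify i (fun r => r.modify j (fun x => (o i j).getD x))) A)
      ((List.range n).map (fun i => (List.range n).map (g i)))
      = (List.range n).map (fun i => (List.range n).map (fun j => (o i j).getD (g i j))) := by
  have hin : ∀ (i : Nat) (A : List (List Int)),
      (List.range n).foldl (fun A j =>
          A.modify i (fun r => r.modify j (fun x => (o i j).getD x))) A
        = A.modify i (fun r => (List.range n).foldl
            (fun r j => r.modify j (fun x => (o i j).getD x)) r) := by
    intro i A
    exact pv_foldl_modify_same (List.range n) i (fun j r => r.modify j (fun x => (o i j).getD x)) A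
  simp only [hin]
  rw [pv_fold_upd]
  exact List.map_congr_left (fun i _ => pv_fold_upd (fun j x => (o i j).getD x) (g i) n)

-- A's diagonal write step as a pointwise optional write
theorem pv_step1 (A : List (List Int)) (i j : Nat) (a1 : Int) :
    (if ((i : Int) == (j : Int)) = true then A.modify i (fun row => row.set j a1) else A)
      = A.modify i (fun r => r.modify j (fun x =>
          ((if i = j then some a1 else none) : Option Int).getD x)) := by
  by_cases h : i = j
  · subst h; simp [List.set_eq_modify]
  · have h' : ¬((i : Int) = (j : Int)) := by exact_mod_cast h
    simp only [h, beq_iff_eq, if_neg h', if_false]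
    simpa using pv_opt_write A i j none

-- A's off-diagonal write step as a pointwise optional write
theorem pv_step2 (A : List (List Int)) (i j : Nat) (dw v2 v3 : Int) :
    (if ((i : Int) == (j : Int) + 1 || (i : Int) == (j : Int) - 1) = true then
        A.modify i (fun row => row.set j v2)
      else if (decide (dw > 2) && ((i : Int) == (j : Int) + 2 || (i : Int) == (j : Int) - 2)) = true then
        A.modify i (fun row => row.set j v3)
      else A)
      = A.modify i (fun r => r.modify j (fun x =>
          ((if (i : Int) = (j : Int) + 1 ∨ (i : Int) = (j : Int) - 1 then some v2
            else if dw > 2 ∧ ((i : Int) = (j : Int) + 2 ∨ (i : Int) = (j : Int) - 2) then some v3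
            else none) : Option Int).getD x)) := by
  by_cases h1 : (i : Int) = (j : Int) + 1 ∨ (i : Int) = (j : Int) - 1
  · simp [h1, List.set_eq_modify]
  · by_cases h2 : dw > 2 ∧ ((i : Int) = (j : Int) + 2 ∨ (i : Int) = (j : Int) - 2)
    · simp [h1, h2, List.set_eq_modify]
    · simp only [beq_iff_eq, Bool.or_eq_true, decide_eq_true_eq, Bool.and_eq_true,
        if_neg h1, if_neg h2]
      simpa using pv_opt_write A i j none

-- ---- B-side machinery: matrices as pointwise maps, single-cell writes, diagonal loops ----

def pvMat (n : Nat) (F : Nat → Nat → Int) : List (List Int) :=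
  (List.range n).map (fun i => (List.range n).map (F i))

theorem pvMat_congr (n : Nat) (F G : Nat → Nat → Int)
    (h : ∀ a b, a < n → b < n → F a b = G a b) : pvMat n F = pvMat n G := by
  unfold pvMat
  exact List.map_congr_left (fun a ha => List.map_congr_left (fun b hb =>
    h a b (List.mem_range.mp ha) (List.mem_range.mp hb)))

theorem pv_write_cell (n i j : Nat) (v : Int) (F : Nat → Nat → Int) (hj : j < n) :
    (pvMat n F).modify i (fun r => r.set j v)
      = pvMat n (fun a b => if a = i ∧ b = j then v else F a b) := by
  unfold pvMat
  apply List.ext_getElem (by simp)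
  intro a ha _
  simp only [List.length_modify, List.length_map, List.length_range] at ha
  rw [List.getElem_modify]
  split_ifs with hai
  · subst hai
    simp only [List.getElem_map, List.getElem_range]
    apply List.ext_getElem (by simp)
    intro b hb _
    simp only [List.length_set, List.length_map, List.length_range] at hb
    rw [List.getElem_set]
    simp only [List.getElem_map, List.getElem_range]
    by_cases hbj : j = b
    · subst hbj; simp
    · rw [if_neg hbj, if_neg (by omega)]
  · simp only [List.getElem_map, List.getElem_range]
    exact List.map_congr_left fun b _ => (if_neg (by omega)).symm

-- the main-diagonal loop acts pointwise
theorem pv_loop1 (n : Nat) (v : Int) (F : Nat → Nat → Int) (m : Nat) (hm : m ≤ n) :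
    (List.range m).foldl (fun A i => A.modify i (fun r => r.set i v)) (pvMat n F)
      = pvMat n (fun a b => if a = b ∧ a < m then v else F a b) := by
  induction m with
  | zero =>
    simp only [List.range_zero, List.foldl_nil]
    exact pvMat_congr n F _ (fun a b _ _ => (if_neg (by omega)).symm)
  | succ m ih =>
    rw [List.range_succ, List.foldl_append, ih (by omega)]
    simp only [List.foldl_cons, List.foldl_nil]
    rw [pv_write_cell n m m v _ (by omega)]
    exact pvMat_congr n _ _ (by intro a b _ _; split_ifs <;> first | rfl | omega)

-- an off-diagonal fill loop (offset o, two symmetric writes per step) acts pointwise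
theorem pv_loop2 (n o : Nat) (v : Int) (F : Nat → Nat → Int) (m : Nat)
    (hm : ∀ i, i < m → i + o < n) :
    (List.range m).foldl (fun A i =>
        (A.modify i (fun r => r.set (i + o) v)).modify (i + o) (fun r => r.set i v))
      (pvMat n F)
      = pvMat n (fun a b => if (a < m ∧ b = a + o) ∨ (b < m ∧ a = b + o) then v else F a b) := by
  induction m with
  | zero =>
    simp only [List.range_zero, List.foldl_nil]
    exact pvMat_congr n F _ (fun a b _ _ => (if_neg (by omega)).symm)
  | succ m ih =>
    rw [List.range_succ, List.foldl_append, ih (fun i hi => hm i (by omega))]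
    simp only [List.foldl_cons, List.foldl_nil]
    rw [pv_write_cell n m (m + o) v _ (hm m (by omega)),
        pv_write_cell n (m + o) m v _ (by have := hm m (by omega); omega)]
    exact pvMat_congr n _ _ (by intro a b _ _; split_ifs <;> first | rfl | omega)

-- range over 0..(n-k) in Int form
theorem pv_pyRange_sub (n k : Nat) :
    PySem.List.pyRange 0 ((n : Int) - (k : Int)) 1
      = (List.range (n - k)).map (fun j => ((j : Nat) : Int)) := by
  rcases le_or_gt (k : Int) (n : Int) with h | h
  · have h2 : (n : Int) - (k : Int) = ((n - k : Nat) : Int) := by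
      have hk : (k : Nat) ≤ n := by exact_mod_cast h
      omega
    rw [h2, PySem.List.pyRange_zero_natCast]
  · have h1 : PySem.List.pyRange 0 ((n : Int) - (k : Int)) 1 = [] :=
      PySem.List.pyRange_one_eq_nil (by omega)
    have h2 : n - k = 0 := by omega
    simp [h1, h2]

-- zero row as a map
theorem pv_replicate_row (n : Nat) :
    List.replicate n (0 : Int) = (List.range n).map (fun _ => (0 : Int)) := by
  simp [List.map_const']

-- ===== VERDICT (by name: the statement is the Claim_ definition above) =====
theorem build_band_matrix_spec : Claim_equal_build_band_matrix := by
  intro N a1 dw a2 a3 _ _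
  unfold Spec_build_band_matrix build_band_matrix build_band_matrix_alt
  rcases le_or_gt 0 N with hN | hN
  · obtain ⟨n, rfl⟩ : ∃ n : Nat, N = (n : Int) := ⟨N.toNat, (Int.toNat_of_nonneg hN).symm⟩
    rw [show ((n : Int) - 1) = ((n : Int) - ((1 : Nat) : Int)) by norm_num,
        show ((n : Int) - 2) = ((n : Int) - ((2 : Nat) : Int)) by norm_num,
        PySem.List.pyRange_zero_natCast n, pv_pyRange_sub n 1, pv_pyRange_sub n 2]
    simp only [List.foldl_map, List.map_map, Function.comp_def, Int.toNat_natCast]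
    -- A side becomes a pointwise formula
    simp only [pv_step1, pv_step2, pv_pass]
    -- B side: each loop becomes a pointwise formula
    have hB1 : (List.range n).foldl (fun A i => A.modify i (fun r => r.set i a1))
        ((List.range n).map (fun _ => List.replicate n (0 : Int)))
        = (List.range n).map (fun i => (List.range n).map (fun j =>
            if i = j ∧ i < n then a1 else 0)) := by
      rw [pv_replicate_row]
      have h := pv_loop1 n a1 (fun _ _ => 0) n (le_refl n)
      unfold pvMat at h; exact h
    rw [hB1]
    by_cases hdw2 : dw > 1
    · rw [if_pos hdw2, if_pos hdw2]
      have hB2 : (List.range (n - 1)).foldl (fun A i =>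
            (A.modify i (fun r => r.set (i + 1) (a2.getD 0))).modify (i + 1)
              (fun r => r.set i (a2.getD 0)))
          ((List.range n).map (fun i => (List.range n).map (fun j =>
            if i = j ∧ i < n then a1 else 0)))
          = (List.range n).map (fun i => (List.range n).map (fun j =>
              if (i < n - 1 ∧ j = i + 1) ∨ (j < n - 1 ∧ i = j + 1) then a2.getD 0
              else if i = j ∧ i < n then a1 else 0)) := by
        have h := pv_loop2 n 1 (a2.getD 0)
          (fun a b => if a = b ∧ a < n then a1 else 0) (n - 1) (fun i hi => by omega)
        unfold pvMat at h; exact h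
      rw [hB2]
      by_cases hdw3 : dw > 2
      · rw [if_pos hdw3]
        have hB3 : (List.range (n - 2)).foldl (fun A i =>
              (A.modify i (fun r => r.set (i + 2) (a3.getD 0))).modify (i + 2)
                (fun r => r.set i (a3.getD 0)))
            ((List.range n).map (fun i => (List.range n).map (fun j =>
              if (i < n - 1 ∧ j = i + 1) ∨ (j < n - 1 ∧ i = j + 1) then a2.getD 0
              else if i = j ∧ i < n then a1 else 0)))
            = (List.range n).map (fun i => (List.range n).map (fun j =>
                if (i < n - 2 ∧ j = i + 2) ∨ (j < n - 2 ∧ i = j + 2) then a3.getD 0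
                else if (i < n - 1 ∧ j = i + 1) ∨ (j < n - 1 ∧ i = j + 1) then a2.getD 0
                else if i = j ∧ i < n then a1 else 0)) := by
          have h := pv_loop2 n 2 (a3.getD 0)
            (fun a b => if (a < n - 1 ∧ b = a + 1) ∨ (b < n - 1 ∧ a = b + 1) then a2.getD 0
                        else if a = b ∧ a < n then a1 else 0) (n - 2) (fun i hi => by omega)
          unfold pvMat at h; exact h
        rw [hB3]
        refine List.map_congr_left fun i hi => List.map_congr_left fun j hj => ?_
        have hi' := List.mem_range.mp hi; have hj' := List.mem_range.mp hj
        split_ifs <;> simp only [Option.getD_some, Option.getD_none] <;> first | rfl | omega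
      · rw [if_neg hdw3]
        refine List.map_congr_left fun i hi => List.map_congr_left fun j hj => ?_
        have hi' := List.mem_range.mp hi; have hj' := List.mem_range.mp hj
        split_ifs <;> simp only [Option.getD_some, Option.getD_none] <;> first | rfl | omega
    · rw [if_neg hdw2, if_neg hdw2]
      refine List.map_congr_left fun i hi => List.map_congr_left fun j hj => ?_
      have hi' := List.mem_range.mp hi; have hj' := List.mem_range.mp hj
      split_ifs <;> simp only [Option.getD_some, Option.getD_none] <;> first | rfl | omega
  · have hnil : PySem.List.pyRange 0 N 1 = [] := PySem.List.pyRange_one_eq_nil (by omega)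
    have hnil1 : PySem.List.pyRange 0 (N - 1) 1 = [] := PySem.List.pyRange_one_eq_nil (by omega)
    have hnil2 : PySem.List.pyRange 0 (N - 2) 1 = [] := PySem.List.pyRange_one_eq_nil (by omega)
    simp [hnil, hnil1, hnil2]
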